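-- pv_equiv track=rewrite | github.com/SemakOV/code_examples | TenEasyFunc.py | shapeArea
-- ===== SOURCE A (Python) =====
-- from functools import reduce
--
-- def shapeArea(n):
--     if n == 1:
--         return 1
--     else:
--         a = n + (n - 1)
--         b = [a]
--         c = a
--         for i in range(n):
--             if c == 1:
--                 break
--             else:
--                 d = (c - 2) * 2
--                 b.append(d)
--                 c = c - 2
--         result = reduce(lambda x, y: x + y, b)
--     return result
--
-- n = 8999
--
-- a = [832, 998, 148, 570, 533, 561, 894, 147, 455, 279]
--
-- b = [832, 570, 148, 998, 533, 561, 455, 147, 894, 279]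
-- ===== SOURCE B (Python) =====
-- def shapeArea(n):
--     return 2 * n * n - 2 * n + 1
-- ===== Notes on version B (the rewrite author's own statement) =====
-- stated objective: faster
-- what changed: Replaced the O(n) loop that accumulates ring perimeters in a list and reduces it with the closed-form formula 2*n*n - 2*n + 1.
-- outside the precondition, e.g. on shapeArea(0): A returns -1, B returns 1; on shapeArea(-3): A returns -7, B returns 25
import Mathlib
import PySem

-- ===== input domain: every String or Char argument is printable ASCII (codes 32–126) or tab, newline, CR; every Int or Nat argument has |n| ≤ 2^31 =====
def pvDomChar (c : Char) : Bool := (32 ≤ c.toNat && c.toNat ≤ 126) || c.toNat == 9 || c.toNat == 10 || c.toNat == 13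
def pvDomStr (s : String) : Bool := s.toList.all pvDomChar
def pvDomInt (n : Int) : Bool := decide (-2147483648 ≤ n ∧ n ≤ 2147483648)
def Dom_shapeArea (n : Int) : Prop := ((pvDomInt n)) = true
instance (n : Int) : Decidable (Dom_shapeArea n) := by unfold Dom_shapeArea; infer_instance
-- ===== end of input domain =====

-- B replaces A's O(n) perimeter-accumulating loop with the closed-form 2*n*n - 2*n + 1 (asymptotically faster).


-- ===== PORT A =====
-- the 'for i in range(n): if c == 1: break else: append; c -= 2' loop, carrying the list b and c
def shapeAreaLoop : List Int → List Int → Int → List Int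
  | [], b, _ => b
  | _ :: rest, b, c =>
    if c == 1 then b
    else shapeAreaLoop rest (b ++ [(c - 2) * 2]) (c - 2)

-- reduce(lambda x, y: x + y, b); b is never empty here (it starts as [a])
def shapeAreaReduce : List Int → Int
  | [] => 0
  | h :: t => t.foldl (· + ·) h

def shapeArea (n : Int) : Int :=
  if n == 1 then 1
  else
    let a := n + (n - 1)
    let b := shapeAreaLoop (PySem.List.pyRange 0 n 1) [a] a
    shapeAreaReduce b

-- ===== PORT B =====
def shapeArea_alt (n : Int) : Int := 2 * n * n - 2 * n + 1

-- ===== PRECONDITION & SPEC =====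
-- Pre_ excludes n ≤ 0: inputs outside the staircase's natural domain, where A's loop never
-- runs and its value 2*n - 1 is an accident of the implementation (e.g. A(0) = -1).
def Pre_shapeArea (n : Int) : Prop := 1 ≤ n
instance (n : Int) : Decidable (Pre_shapeArea n) := by unfold Pre_shapeArea; infer_instance
def pvWitness_shapeArea : Int := 3

def Spec_shapeArea (n : Int) (out : Int) : Prop := out = shapeArea_alt n
instance (n : Int) (out : Int) : Decidable (Spec_shapeArea n out) := by unfold Spec_shapeArea; infer_instance

-- ===== CLAIM (what is proved, stated in full; the proofs are below) =====
def Claim_equal_shapeArea : Prop := ∀ (n : Int), Dom_shapeArea n → Pre_shapeArea n → Spec_shapeArea n (shapeArea n)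

-- ===== LEMMAS AND PROOFS =====

-- the loop only appends to b
theorem shapeAreaLoop_prefix (l : List Int) (b : List Int) (c : Int) :
    ∃ t, shapeAreaLoop l b c = b ++ t := by
  induction l generalizing b c with
  | nil => exact ⟨[], by simp [shapeAreaLoop]⟩
  | cons x rest ih =>
    by_cases h : c = 1
    · exact ⟨[], by simp [shapeAreaLoop, h]⟩
    · obtain ⟨t, ht⟩ := ih (b ++ [(c - 2) * 2]) (c - 2)
      refine ⟨(c - 2) * 2 :: t, ?_⟩
      simp [shapeAreaLoop, h, ht]

-- sum of the loop's output, for odd counters c = 2m+1 and enough iterations left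
theorem shapeAreaLoop_sum (m : Nat) (l : List Int) (b : List Int)
    (hl : m ≤ l.length) :
    (shapeAreaLoop l b (2 * (m : Int) + 1)).sum = b.sum + 2 * (m : Int) * m := by
  induction m generalizing l b with
  | zero =>
    cases l with
    | nil => simp [shapeAreaLoop]
    | cons x rest => simp [shapeAreaLoop]
  | succ k ih =>
    cases l with
    | nil => simp at hl
    | cons x rest =>
      have hc : (2 * ((k : Int) + 1) + 1) ≠ 1 := by omega
      have hrest : k ≤ rest.length := by simpa using hl
      have := ih rest (b ++ [(2 * ((k : Int) + 1) + 1 - 2) * 2])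
        hrest
      push_cast
      push_cast at this
      simp only [shapeAreaLoop, beq_iff_eq]
      rw [if_neg (by push_cast; omega)]
      have harg : (2 * ((k : Int) + 1) + 1 - 2) = 2 * (k : Int) + 1 := by ring
      rw [harg] at this ⊢
      rw [this]
      simp [List.sum_append]
      ring

theorem reduce_eq_sum (h : Int) (t : List Int) :
    shapeAreaReduce (h :: t) = (h :: t).sum := by
  simp only [shapeAreaReduce, List.sum_cons]
  induction t generalizing h with
  | nil => simp
  | cons x xs ih => simp [List.foldl_cons, ih (h + x)]; ring

-- ===== VERDICT (by name: the statement is the Claim_ definition above) =====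
theorem shapeArea_spec : Claim_equal_shapeArea := by
  intro n _ hn
  show shapeArea n = shapeArea_alt n
  by_cases h1 : n = 1
  · subst h1; decide
  · have hn1 : 1 ≤ n := hn
    have hn2 : 2 ≤ n := by omega
    obtain ⟨m, hm⟩ : ∃ m : Nat, (m : Int) = n - 1 := ⟨(n - 1).toNat, by omega⟩
    have hlen : m ≤ (PySem.List.pyRange 0 n 1).length := by
      rw [PySem.List.length_pyRange_one]; omega
    have hodd : n + (n - 1) = 2 * (m : Int) + 1 := by omega
    have hsum := shapeAreaLoop_sum m (PySem.List.pyRange 0 n 1) [n + (n - 1)] hlen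
    rw [← hodd] at hsum
    obtain ⟨t, ht⟩ := shapeAreaLoop_prefix (PySem.List.pyRange 0 n 1) [n + (n - 1)] (n + (n - 1))
    rw [ht] at hsum
    simp only [List.cons_append, List.nil_append, List.sum_cons, List.sum_nil] at hsum
    have hred : shapeAreaReduce ((n + (n - 1)) :: t) = n + (n - 1) + t.sum := by
      rw [reduce_eq_sum]; simp
    simp only [shapeArea, beq_iff_eq, if_neg h1, ht, List.cons_append, List.nil_append,
      shapeArea_alt]
    rw [hred]
    have htsum : t.sum = 2 * (m : Int) * m := by omega
    rw [htsum, hm]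
    ring
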